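-- pv_equiv track=rewrite | github.com/ePaint/poker_image_analyzer | hand_history/seat_mapping.py | calculate_seat_mapping
-- ===== SOURCE A (Python) =====
-- from enum import StrEnum
--
-- class TableType(StrEnum):
--     SIX_PLAYER = "6_player"
--     FIVE_PLAYER = "5_player"
--
-- POSITION_ORDER_6PLAYER = ("bottom", "bottom_left", "top_left", "top", "top_right", "bottom_right")
--
-- POSITION_ORDER_5PLAYER = ("bottom", "left", "top_left", "top_right", "right")
--
-- DEFAULT_SEAT_MAPPINGS: dict[TableType, dict[str, int]] = {
--     TableType.SIX_PLAYER: {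
--         "bottom": 1,
--         "bottom_left": 2,
--         "top_left": 3,
--         "top": 4,
--         "top_right": 5,
--         "bottom_right": 6,
--     },
--     TableType.FIVE_PLAYER: {
--         "bottom": 1,
--         "left": 2,
--         "top_left": 3,
--         "top_right": 4,
--         "right": 5,
--     },
-- }
--
-- def _get_position_order(table_type: str | TableType) -> tuple[str, ...]:
--     """Get position order tuple for the given table type."""
--     return POSITION_ORDER_5PLAYER if table_type == TableType.FIVE_PLAYER else POSITION_ORDER_6PLAYER
--
-- def _get_table_type(table_type: str | TableType) -> TableType:
--     """Convert string to TableType enum."""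
--     if isinstance(table_type, TableType):
--         return table_type
--     return TableType(table_type)
--
-- def calculate_seat_mapping(
--     screenshot_button_position: str,
--     hand_button_seat: int,
--     table_type: str | TableType = TableType.SIX_PLAYER,
-- ) -> dict[str, int]:
--     """Calculate position-to-seat mapping based on button positions.
--
--     Uses the dealer button as an anchor to align screenshot positions with
--     hand history seat numbers. The button position in the screenshot tells us
--     which screen position corresponds to the button seat in the hand history.
--
--     Args:
--         screenshot_button_position: Position name where D button was detected (e.g., "top_left")
--         hand_button_seat: Seat number that has the button in hand history (1-6)
--         table_type: TableType.SIX_PLAYER or TableType.FIVE_PLAYER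
--
--     Returns:
--         Dict mapping position name to seat number
--     """
--     tt = _get_table_type(table_type)
--     position_order = _get_position_order(tt)
--     num_seats = len(position_order)
--
--     if screenshot_button_position not in position_order:
--         return DEFAULT_SEAT_MAPPINGS.get(tt, DEFAULT_SEAT_MAPPINGS[TableType.SIX_PLAYER]).copy()
--
--     button_position_idx = position_order.index(screenshot_button_position)
--
--     mapping: dict[str, int] = {}
--     for i, position in enumerate(position_order):
--         offset = i - button_position_idx
--         seat = ((hand_button_seat - 1 + offset) % num_seats) + 1
--         mapping[position] = seat
--
--     return mapping
-- ===== SOURCE B (Python) =====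
-- from enum import StrEnum
--
-- class TableType(StrEnum):
--     SIX_PLAYER = "6_player"
--     FIVE_PLAYER = "5_player"
--
-- POSITION_ORDER_6PLAYER = ("bottom", "bottom_left", "top_left", "top", "top_right", "bottom_right")
-- POSITION_ORDER_5PLAYER = ("bottom", "left", "top_left", "top_right", "right")
--
-- DEFAULT_SEAT_MAPPINGS = {
--     TableType.SIX_PLAYER: dict(zip(POSITION_ORDER_6PLAYER, range(1, 7))),
--     TableType.FIVE_PLAYER: dict(zip(POSITION_ORDER_5PLAYER, range(1, 6))),
-- }
--
-- def calculate_seat_mapping(screenshot_button_position, hand_button_seat, table_type=TableType.SIX_PLAYER):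
--     tt = TableType(table_type)
--     order = POSITION_ORDER_5PLAYER if tt == TableType.FIVE_PLAYER else POSITION_ORDER_6PLAYER
--     n = len(order)
--     if screenshot_button_position not in order:
--         return dict(DEFAULT_SEAT_MAPPINGS[tt])
--     # Walk the table clockwise starting at the button, handing out consecutive
--     # seat numbers with an explicit wrap-around successor; the button seat is
--     # normalized into 1..n once, and no per-position modular arithmetic is done.
--     seat_of = {}
--     pos_i = order.index(screenshot_button_position)
--     seat = (hand_button_seat - 1) % n + 1
--     for _ in range(n):
--         seat_of[order[pos_i]] = seat
--         seat = 1 if seat == n else seat + 1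
--         pos_i = 0 if pos_i == n - 1 else pos_i + 1
--     return {p: seat_of[p] for p in order}
-- ===== Notes on version B (the rewrite author's own statement) =====
-- stated objective: alternative
-- what changed: B replaces A's per-position offset arithmetic ((hand_button_seat-1+i-button_idx) % n + 1 for each enumerated position) with a stateful clockwise walk: the button seat is normalized into 1..n once, then two cursors (a position index and a seat counter with an explicit wrap-around successor) hand out consecutive seats starting at the button, after which the dict is re-emitted in canonical order; defaults are built with zip instead of literals.
import Mathlib
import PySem

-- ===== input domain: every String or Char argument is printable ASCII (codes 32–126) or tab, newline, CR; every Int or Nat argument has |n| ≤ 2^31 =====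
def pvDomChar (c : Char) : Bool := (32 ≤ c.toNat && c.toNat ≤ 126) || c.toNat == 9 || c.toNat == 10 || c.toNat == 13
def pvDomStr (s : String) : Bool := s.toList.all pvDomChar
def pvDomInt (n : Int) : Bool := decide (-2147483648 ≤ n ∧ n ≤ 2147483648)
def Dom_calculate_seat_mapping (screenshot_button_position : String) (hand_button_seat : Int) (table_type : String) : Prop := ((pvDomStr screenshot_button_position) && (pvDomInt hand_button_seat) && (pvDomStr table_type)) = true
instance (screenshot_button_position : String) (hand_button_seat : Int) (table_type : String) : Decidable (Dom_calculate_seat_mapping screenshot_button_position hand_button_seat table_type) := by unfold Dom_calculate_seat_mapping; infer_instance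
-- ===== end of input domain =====

-- B replaces A's per-position offset arithmetic with a stateful clockwise walk from the button
-- (seat normalized into 1..n once, then a wrap-around successor counter), re-emitted in canonical
-- order; alternative decomposition, same cost.

-- ===== PORT A =====
def POS6 : List String := ["bottom", "bottom_left", "top_left", "top", "top_right", "bottom_right"]
def POS5 : List String := ["bottom", "left", "top_left", "top_right", "right"]
def DEFAULT6 : List (String × Int) :=
  [("bottom", 1), ("bottom_left", 2), ("top_left", 3), ("top", 4), ("top_right", 5), ("bottom_right", 6)]
def DEFAULT5 : List (String × Int) :=
  [("bottom", 1), ("left", 2), ("top_left", 3), ("top_right", 4), ("right", 5)]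

-- _get_table_type raises ValueError on any string other than "6_player"/"5_player";
-- those inputs are outside Pre_ and the port returns [] there (never claimed).
def calculate_seat_mapping (screenshot_button_position : String) (hand_button_seat : Int) (table_type : String) : List (String × Int) :=
  if table_type = "6_player" ∨ table_type = "5_player" then
    let position_order := if table_type = "5_player" then POS5 else POS6
    let num_seats : Int := position_order.length
    if screenshot_button_position ∈ position_order then
      match PySem.List.index? position_order screenshot_button_position with
      | some button_position_idx =>
        ((PySem.List.enumerate position_order).foldl
          (fun (m : PySem.Dict String Int) (ip : Int × String) =>
            m.insert ip.2 (PySem.Int.mod (hand_button_seat - 1 + (ip.1 - (button_position_idx : Int))) num_seats + 1))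
          PySem.Dict.empty).items
      | none => []  -- unreachable: membership was just checked
    else if table_type = "5_player" then DEFAULT5 else DEFAULT6
  else []

-- ===== PORT B =====
-- Source B's for-loop over range(n): fuel = remaining iterations; state = (seat, pos_i, seat_of).
-- order[pos_i] is ported as List.getD (pos_i stays in range on every reached call, so exact).
def walkB (order : List String) (n : Int) : Nat → Int → Nat → PySem.Dict String Int → PySem.Dict String Int
  | 0, _, _, d => d
  | k+1, seat, pi, d =>
      walkB order n k (if seat = n then 1 else seat + 1)
        (if pi = order.length - 1 then 0 else pi + 1)
        (d.insert (order.getD pi "") seat)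

def calculate_seat_mapping_alt (screenshot_button_position : String) (hand_button_seat : Int) (table_type : String) : List (String × Int) :=
  if table_type = "6_player" ∨ table_type = "5_player" then
    let order := if table_type = "5_player" then POS5 else POS6
    let n : Int := order.length
    if screenshot_button_position ∈ order then
      match PySem.List.index? order screenshot_button_position with
      | some pi =>
        let seat_of := walkB order n order.length (PySem.Int.mod (hand_button_seat - 1) n + 1) pi PySem.Dict.empty
        order.map (fun p => (p, seat_of.getD p 0))
      | none => []  -- unreachable: membership was just checked
    else (PySem.List.enumerate order).map (fun ip => (ip.2, ip.1 + 1))  -- dict(DEFAULT_SEAT_MAPPINGS[tt]), built from the order tuple via zip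
  else []

-- ===== PRECONDITION & SPEC =====
-- Pre_ excludes exactly the table_type strings on which A raises ValueError (TableType(table_type)).
def Pre_calculate_seat_mapping (screenshot_button_position : String) (hand_button_seat : Int) (table_type : String) : Prop :=
  table_type = "6_player" ∨ table_type = "5_player"
instance (screenshot_button_position : String) (hand_button_seat : Int) (table_type : String) : Decidable (Pre_calculate_seat_mapping screenshot_button_position hand_button_seat table_type) := by unfold Pre_calculate_seat_mapping; infer_instance

def pvWitness_calculate_seat_mapping : String × Int × String := ("top_left", 3, "6_player")

def Spec_calculate_seat_mapping (screenshot_button_position : String) (hand_button_seat : Int) (table_type : String) (out : List (String × Int)) : Prop := out = calculate_seat_mapping_alt screenshot_button_position hand_button_seat table_type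
instance (screenshot_button_position : String) (hand_button_seat : Int) (table_type : String) (out : List (String × Int)) : Decidable (Spec_calculate_seat_mapping screenshot_button_position hand_button_seat table_type out) := by unfold Spec_calculate_seat_mapping; infer_instance

-- ===== CLAIM (what is proved, stated in full; the proofs are below) =====
def Claim_equal_calculate_seat_mapping : Prop := ∀ (screenshot_button_position : String) (hand_button_seat : Int) (table_type : String), Dom_calculate_seat_mapping screenshot_button_position hand_button_seat table_type → Pre_calculate_seat_mapping screenshot_button_position hand_button_seat table_type → Spec_calculate_seat_mapping screenshot_button_position hand_button_seat table_type (calculate_seat_mapping screenshot_button_position hand_button_seat table_type)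

-- ===== LEMMAS AND PROOFS =====

-- A's dict-building loop over distinct position names appends one item per position.
theorem itemsA_eq_map (hb b' n : Int) (ord : List String) (hnd : ord.Nodup) :
    ((PySem.List.enumerate ord).foldl
      (fun (m : PySem.Dict String Int) (ip : Int × String) =>
        m.insert ip.2 (PySem.Int.mod (hb - 1 + (ip.1 - b')) n + 1))
      PySem.Dict.empty).items
    = (PySem.List.enumerate ord).map
        (fun ip => (ip.2, PySem.Int.mod (hb - 1 + (ip.1 - b')) n + 1)) := by
  rw [PySem.Dict.items_foldl_insert_fresh (PySem.List.enumerate ord)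
      (fun ip => ip.2) (fun ip => PySem.Int.mod (hb - 1 + (ip.1 - b')) n + 1)
      PySem.Dict.empty (by intro a _; exact PySem.Dict.contains_empty _)
      (by rw [PySem.List.map_snd_enumerate]; exact hnd)]
  rfl

-- ===== VERDICT (by name: the statement is the Claim_ definition above) =====
set_option maxHeartbeats 1000000 in
theorem calculate_seat_mapping_spec : Claim_equal_calculate_seat_mapping := by
  intro sp hb tt _ hpre
  unfold Spec_calculate_seat_mapping calculate_seat_mapping calculate_seat_mapping_alt
  have h06 : 0 ≤ PySem.Int.mod (hb - 1) 6 := PySem.Int.mod_nonneg _ (by norm_num)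
  have h66 : PySem.Int.mod (hb - 1) 6 < 6 := PySem.Int.mod_lt _ (by norm_num)
  have key6 : ∀ c : Int, PySem.Int.mod (hb - 1 + c) 6 = PySem.Int.mod (PySem.Int.mod (hb - 1) 6 + c) 6 := by
    intro c
    simp only [PySem.Int.mod_eq_emod_of_pos (show (0:Int) < 6 by norm_num)]
    omega
  have h05 : 0 ≤ PySem.Int.mod (hb - 1) 5 := PySem.Int.mod_nonneg _ (by norm_num)
  have h55 : PySem.Int.mod (hb - 1) 5 < 5 := PySem.Int.mod_lt _ (by norm_num)
  have key5 : ∀ c : Int, PySem.Int.mod (hb - 1 + c) 5 = PySem.Int.mod (PySem.Int.mod (hb - 1) 5 + c) 5 := by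
    intro c
    simp only [PySem.Int.mod_eq_emod_of_pos (show (0:Int) < 5 by norm_num)]
    omega
  rcases hpre with h | h <;> subst h
  · by_cases hm : sp ∈ POS6
    · simp only [POS6, List.mem_cons, List.not_mem_nil, or_false] at hm
      rcases hm with h | h | h | h | h | h <;> subst h <;>
      · simp only [String.reduceEq, POS6, List.mem_cons, List.not_mem_nil, or_false,
          or_true, if_true, PySem.List.index?_eq_idxOf?, List.idxOf?, List.findIdx?,
          List.findIdx?.go, String.reduceBEq, Bool.false_eq_true, if_false,
          List.length_cons, List.length_nil, Nat.cast_ofNat, Nat.cast_zero, Nat.cast_one,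
          Nat.reduceAdd]
        rw [itemsA_eq_map hb _ _ _ (by decide)]
        simp only [PySem.List.enumerate_cons, PySem.List.enumerate_nil, List.map_cons, List.map_nil]
        simp only [key6]
        generalize PySem.Int.mod (hb - 1) 6 = m at h06 h66 ⊢
        interval_cases m <;> decide
    · rw [if_pos (Or.inl rfl)]
      simp only [String.reduceEq, reduceIte]
      rw [if_neg hm, if_neg hm]
      decide
  · by_cases hm : sp ∈ POS5
    · simp only [POS5, List.mem_cons, List.not_mem_nil, or_false] at hm
      rcases hm with h | h | h | h | h <;> subst h <;>
      · simp only [String.reduceEq, POS5, List.mem_cons, List.not_mem_nil, or_false,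
          or_true, if_true, PySem.List.index?_eq_idxOf?, List.idxOf?, List.findIdx?,
          List.findIdx?.go, String.reduceBEq, Bool.false_eq_true, if_false,
          List.length_cons, List.length_nil, Nat.cast_ofNat, Nat.cast_zero, Nat.cast_one,
          Nat.reduceAdd]
        rw [itemsA_eq_map hb _ _ _ (by decide)]
        simp only [PySem.List.enumerate_cons, PySem.List.enumerate_nil, List.map_cons, List.map_nil]
        simp only [key5]
        generalize PySem.Int.mod (hb - 1) 5 = m at h05 h55 ⊢
        interval_cases m <;> decide
    · rw [if_pos (Or.inr rfl)]
      simp only [String.reduceEq, reduceIte]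
      rw [if_neg hm, if_neg hm]
      decide
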